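-- pv_equiv track=rewrite | github.com/nukima/python-codeptit | datTen.py | name_gen
-- ===== SOURCE A (Python) =====
-- def name_gen(k, name_pool):
--     if k == 1:
--         return name_pool
--     else:
--         return [
--             y + " " + x
--             for y in name_gen(1, name_pool)
--             for x in name_gen(k - 1, name_pool)
--             if x > y
--         ]
-- ===== SOURCE B (Python) =====
-- def name_gen(k, name_pool):
--     # Bottom-up: build level i from level i-1 once, instead of recomputing
--     # name_gen(k-1) anew for every y as A does.
--     result = name_pool
--     for _ in range(k - 1):
--         result = [y + " " + x for y in name_pool for x in result if x > y]
--     return result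
-- ===== Notes on version B (the rewrite author's own statement) =====
-- stated objective: alternative
-- what changed: Replaces A's naive recursion, which recomputes name_gen(k-1) from scratch for every y in the pool, by a bottom-up loop that builds each level exactly once.
import Mathlib
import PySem

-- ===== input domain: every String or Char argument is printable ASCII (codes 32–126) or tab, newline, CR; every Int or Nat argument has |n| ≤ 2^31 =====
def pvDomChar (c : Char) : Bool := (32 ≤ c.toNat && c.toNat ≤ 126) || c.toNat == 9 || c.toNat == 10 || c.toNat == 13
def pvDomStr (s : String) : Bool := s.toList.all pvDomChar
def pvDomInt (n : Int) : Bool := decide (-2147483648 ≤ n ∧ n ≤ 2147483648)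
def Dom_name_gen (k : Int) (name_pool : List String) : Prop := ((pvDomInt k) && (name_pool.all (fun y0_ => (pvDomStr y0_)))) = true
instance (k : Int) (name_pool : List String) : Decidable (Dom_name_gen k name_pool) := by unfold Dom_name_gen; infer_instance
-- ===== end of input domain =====

-- B builds each level once bottom-up instead of A's naive recursion that recomputes
-- name_gen(k-1) for every y.

-- ===== PORT A =====
-- Literal port of A's recursion; the 'k < 1' guard only makes the recursion total
-- (Python diverges/raises there, excluded by Pre_).
def name_gen (k : Int) (name_pool : List String) : List String :=
  if k == 1 then name_pool
  else if k < 1 then []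
  else (name_gen 1 name_pool).flatMap (fun y =>
    ((name_gen (k - 1) name_pool).filter (fun x => decide (y < x))).map
      (fun x => y ++ " " ++ x))
termination_by k.toNat
decreasing_by all_goals (simp_all; omega)

-- ===== PORT B =====
def name_gen_alt (k : Int) (name_pool : List String) : List String :=
  (List.range (k - 1).toNat).foldl
    (fun result _ =>
      name_pool.flatMap (fun y =>
        (result.filter (fun x => decide (y < x))).map (fun x => y ++ " " ++ x)))
    name_pool

-- ===== PRECONDITION & SPEC =====
-- Pre_ excludes k < 1, where Python A recurses without a base case (RecursionError).
def Pre_name_gen (k : Int) (name_pool : List String) : Prop := 1 ≤ k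
instance (k : Int) (name_pool : List String) : Decidable (Pre_name_gen k name_pool) := by unfold Pre_name_gen; infer_instance
def pvWitness_name_gen : Int × List String := (2, ["alice", "bob"])

def Spec_name_gen (k : Int) (name_pool : List String) (out : List String) : Prop := out = name_gen_alt k name_pool
instance (k : Int) (name_pool : List String) (out : List String) : Decidable (Spec_name_gen k name_pool out) := by unfold Spec_name_gen; infer_instance

-- ===== CLAIM (what is proved, stated in full; the proofs are below) =====
def Claim_equal_name_gen : Prop := ∀ (k : Int) (name_pool : List String), Dom_name_gen k name_pool → Pre_name_gen k name_pool → Spec_name_gen k name_pool (name_gen k name_pool)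

-- ===== LEMMAS AND PROOFS =====

-- the shared level step
def pvStep (name_pool : List String) (result : List String) : List String :=
  name_pool.flatMap (fun y =>
    (result.filter (fun x => decide (y < x))).map (fun x => y ++ " " ++ x))

theorem name_gen_succ (n : Nat) (pool : List String) :
    name_gen ((n : Int) + 2) pool = pvStep pool (name_gen ((n : Int) + 1) pool) := by
  rw [name_gen]
  have h1 : ¬ ((n : Int) + 2 == 1) = true := by simp; omega
  have h2 : ¬ ((n : Int) + 2 < 1) := by omega
  simp only [h1, if_false, if_neg h2]
  have : name_gen 1 pool = pool := by rw [name_gen]; simp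
  rw [this]
  have h3 : (n : Int) + 2 - 1 = (n : Int) + 1 := by ring
  rw [h3, pvStep]
  simp

theorem name_gen_eq_iter (n : Nat) (pool : List String) :
    name_gen ((n : Int) + 1) pool = (List.range n).foldl (fun r _ => pvStep pool r) pool := by
  induction n with
  | zero => rw [name_gen]; simp
  | succ m ih =>
      have : ((m : Int) + 1) + 1 = (m : Int) + 2 := by ring
      rw [List.range_succ, List.foldl_append, ← ih, List.foldl_cons, List.foldl_nil]
      push_cast
      rw [this, name_gen_succ]

-- ===== VERDICT (by name: the statement is the Claim_ definition above) =====
theorem name_gen_spec : Claim_equal_name_gen := by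
  intro k pool _ hpre
  unfold Spec_name_gen name_gen_alt
  have hk : k = ((k - 1).toNat : Int) + 1 := by
    have := Int.toNat_of_nonneg (a := k - 1) (by exact Int.sub_nonneg.mpr hpre)
    omega
  rw [hk, name_gen_eq_iter]
  have : (((k - 1).toNat : Int) + 1 - 1).toNat = (k - 1).toNat := by omega
  rw [this]
  rfl
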